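-- pv_equiv track=rewrite | github.com/JIBINJOHNV/pqtl_twosamplemr | MetaP/Combine_AllDisease_Cis_Trans_MRResults.py | order_function
-- ===== SOURCE A (Python) =====
-- def order_function(unorderedcolumns):
--     asdbeta=[x for x in unorderedcolumns if "ASD_PGC" in x]
--     sczbeta=[x for x in unorderedcolumns if "PGC3_SCZ" in x]
--     mddbeta=[x for x in unorderedcolumns if "Depression_iPSYCH_2023" in x]
--     bipbeta=[x for x in unorderedcolumns if "BIP_PGC3_noukb" in x]
--     eatingbeta=[x for x in unorderedcolumns if "PGC_AN2" in x]
--     adhdeta=[x for x in unorderedcolumns if "ADHD2022_iPSYCH_deCODE" in x]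
--     beta_order=sczbeta+bipbeta+mddbeta+adhdeta+asdbeta+eatingbeta
--     return(beta_order)
-- ===== SOURCE B (Python) =====
-- _KEYS = ("PGC3_SCZ", "BIP_PGC3_noukb", "Depression_iPSYCH_2023",
--          "ADHD2022_iPSYCH_deCODE", "ASD_PGC", "PGC_AN2")
--
-- def order_function(unorderedcolumns):
--     # decorate: tag every element with the rank of each category it matches
--     tagged = [(rank, x)
--               for x in unorderedcolumns
--               for rank, key in enumerate(_KEYS)
--               if key in x]
--     # stable sort by rank keeps original order inside each category
--     return [x for _, x in sorted(tagged, key=lambda t: t[0])]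
-- ===== Notes on version B (the rewrite author's own statement) =====
-- stated objective: alternative
-- what changed: Decorate-sort-undecorate: each element is tagged with the rank of every category substring it matches, the tagged pairs are stable-sorted by rank, and the tags are stripped, instead of running six separate filter passes and concatenating them.
import Mathlib
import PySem

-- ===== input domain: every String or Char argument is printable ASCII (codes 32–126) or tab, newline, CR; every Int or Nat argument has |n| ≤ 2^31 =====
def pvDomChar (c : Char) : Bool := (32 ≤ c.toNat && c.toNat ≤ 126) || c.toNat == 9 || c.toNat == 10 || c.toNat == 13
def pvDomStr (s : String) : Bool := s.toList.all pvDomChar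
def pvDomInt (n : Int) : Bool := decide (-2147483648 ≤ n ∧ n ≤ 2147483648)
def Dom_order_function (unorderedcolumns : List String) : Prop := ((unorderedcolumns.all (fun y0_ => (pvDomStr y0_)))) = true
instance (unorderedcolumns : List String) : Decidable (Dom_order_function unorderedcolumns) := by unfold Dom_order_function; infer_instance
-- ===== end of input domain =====

-- B re-implements the column ordering by decorate-sort-undecorate (tag each element with every matching category rank, stable-sort by rank, strip tags) instead of six filter passes; alternative algorithm, return value identical.


-- ===== PORT A =====
def order_function (unorderedcolumns : List String) : List String :=
  let asdbeta := unorderedcolumns.filter (fun x => PySem.Str.isIn "ASD_PGC" x)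
  let sczbeta := unorderedcolumns.filter (fun x => PySem.Str.isIn "PGC3_SCZ" x)
  let mddbeta := unorderedcolumns.filter (fun x => PySem.Str.isIn "Depression_iPSYCH_2023" x)
  let bipbeta := unorderedcolumns.filter (fun x => PySem.Str.isIn "BIP_PGC3_noukb" x)
  let eatingbeta := unorderedcolumns.filter (fun x => PySem.Str.isIn "PGC_AN2" x)
  let adhdeta := unorderedcolumns.filter (fun x => PySem.Str.isIn "ADHD2022_iPSYCH_deCODE" x)
  sczbeta ++ bipbeta ++ mddbeta ++ adhdeta ++ asdbeta ++ eatingbeta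

-- ===== PORT B =====
-- the module-level _KEYS tuple of Source B
def pvKeys : List String :=
  ["PGC3_SCZ", "BIP_PGC3_noukb", "Depression_iPSYCH_2023",
   "ADHD2022_iPSYCH_deCODE", "ASD_PGC", "PGC_AN2"]

-- inner comprehension '[(rank, x) for rank, key in enumerate(_KEYS) if key in x]'
def pvEntries (x : String) : List (Int × String) :=
  (PySem.List.enumerate pvKeys).flatMap
    (fun rk => if PySem.Str.isIn rk.2 x then [(rk.1, x)] else [])

def order_function_alt (unorderedcolumns : List String) : List String :=
  let tagged := unorderedcolumns.flatMap pvEntries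
  (PySem.List.sorted tagged (fun t => t.1)).map (fun t => t.2)

-- ===== PRECONDITION & SPEC =====
def Spec_order_function (unorderedcolumns : List String) (out : List String) : Prop :=
  out = order_function_alt unorderedcolumns
instance (unorderedcolumns : List String) (out : List String) :
    Decidable (Spec_order_function unorderedcolumns out) := by
  unfold Spec_order_function; infer_instance

-- ===== CLAIM =====
def Claim_equal_order_function : Prop :=
  ∀ (unorderedcolumns : List String), Dom_order_function unorderedcolumns →
    Spec_order_function unorderedcolumns (order_function unorderedcolumns)

-- ===== LEMMAS AND PROOFS =====

-- proof-only helpers: the per-rank group of a tagged list, and grouping along a rank list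
def pvGroup (ts : List (Int × String)) (r : Int) : List (Int × String) :=
  ts.filter (fun t => t.1 == r)

def pvGl (rs : List Int) (ts : List (Int × String)) : List (Int × String) :=
  rs.flatMap (fun r => pvGroup ts r)

theorem mem_pvGroup {ts : List (Int × String)} {r : Int} {y : Int × String}
    (h : y ∈ pvGroup ts r) : y.1 = r := by
  simp [pvGroup, List.mem_filter] at h; exact h.2

theorem mem_pvGl {rs : List Int} {ts : List (Int × String)} {y : Int × String}
    (h : y ∈ pvGl rs ts) : y.1 ∈ rs := by
  simp [pvGl, List.mem_flatMap] at h
  obtain ⟨r, hr, hy⟩ := h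
  exact (mem_pvGroup hy) ▸ hr

theorem pvGroup_append (ts : List (Int × String)) (t : Int × String) (r : Int) :
    pvGroup (ts ++ [t]) r = pvGroup ts r ++ (if t.1 == r then [t] else []) := by
  simp only [pvGroup, List.filter_append]
  by_cases h : t.1 = r <;> simp [h]

theorem pvGl_append_not_mem (rs : List Int) (ts : List (Int × String))
    (t : Int × String) (h : t.1 ∉ rs) : pvGl rs (ts ++ [t]) = pvGl rs ts := by
  induction rs with
  | nil => rfl
  | cons r rs ih =>
    simp only [pvGl, List.flatMap_cons] at *
    rw [pvGroup_append]
    have hr : (t.1 == r) = false := by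
      simp only [beq_eq_false_iff_ne]; intro he; exact h (by simp [he])
    rw [hr]
    simp [ih (fun hm => h (by simp [hm]))]

theorem insertBy_append_of_not {α : Type} (before : α → α → Bool) (x : α)
    (u w : List α) (hu : ∀ y ∈ u, before x y = false) :
    PySem.List.insertBy before x (u ++ w) = u ++ PySem.List.insertBy before x w := by
  induction u with
  | nil => rfl
  | cons a u ih =>
    have ha := hu a (by simp)
    simp [PySem.List.insertBy, ha, ih (fun y hy => hu y (by simp [hy]))]

theorem insertBy_all_before {α : Type} (before : α → α → Bool) (x : α)
    (v : List α) (hv : ∀ y ∈ v, before x y = true) :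
    PySem.List.insertBy before x v = x :: v := by
  cases v with
  | nil => rfl
  | cons y ys => simp [PySem.List.insertBy, hv y (by simp)]

-- inserting a tagged pair into a rank-grouped list appends it to its own group
theorem insert_pvGl (rs : List Int) (ts : List (Int × String)) (t : Int × String)
    (hs : rs.Pairwise (· < ·)) (hm : t.1 ∈ rs) :
    PySem.List.insertBy (fun a b => decide (a.1 < b.1)) t (pvGl rs ts)
      = pvGl rs (ts ++ [t]) := by
  induction rs with
  | nil => simp at hm
  | cons r rs ih =>
    have hlt : ∀ r' ∈ rs, r < r' := (List.pairwise_cons.mp hs).1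
    simp only [pvGl, List.flatMap_cons]
    by_cases hr : t.1 = r
    · rw [insertBy_append_of_not _ _ _ _
        (fun y hy => by simp [mem_pvGroup hy, hr])]
      rw [insertBy_all_before _ _ _
        (fun y hy => by
          have := hlt _ (mem_pvGl hy)
          simp only [decide_eq_true_eq]; omega)]
      rw [pvGroup_append]
      have hbeq : (t.1 == r) = true := by simp [hr]
      rw [hbeq]
      have hnm : t.1 ∉ rs := fun h => by have := hlt _ h; omega
      have hfl : List.flatMap (fun r => pvGroup (ts ++ [t]) r) rs
          = List.flatMap (fun r => pvGroup ts r) rs := by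
        have := pvGl_append_not_mem rs ts t hnm
        simpa [pvGl] using this
      rw [hfl]; simp
    · have hm' : t.1 ∈ rs := by
        rcases List.mem_cons.mp hm with h | h
        · exact absurd h hr
        · exact h
      rw [insertBy_append_of_not _ _ _ _
        (fun y hy => by
          have h1 := mem_pvGroup hy
          have h2 := hlt _ hm'
          simp only [decide_eq_false_iff_not, h1]; omega)]
      have hih := ih (List.pairwise_cons.mp hs).2 hm'
      simp only [pvGl] at hih
      rw [hih, pvGroup_append]
      have hbeq : (t.1 == r) = false := by simp [hr]
      rw [hbeq]; simp

def pvRanks : List Int := [0, 1, 2, 3, 4, 5]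

theorem foldl_insert_grouped (ts : List (Int × String))
    (h : ∀ t ∈ ts, t.1 ∈ pvRanks) :
    ts.foldl (fun acc t => PySem.List.insertBy (fun a b => decide (a.1 < b.1)) t acc) []
      = pvGl pvRanks ts := by
  induction ts using List.reverseRecOn with
  | nil => rfl
  | append_singleton ts t ih =>
    rw [List.foldl_append, List.foldl_cons, List.foldl_nil]
    rw [ih (fun y hy => h y (by simp [hy]))]
    exact insert_pvGl _ _ _ (by unfold pvRanks; decide) (h t (by simp))

theorem enumerate_pvKeys :
    PySem.List.enumerate pvKeys =
      [((0 : Int), "PGC3_SCZ"), (1, "BIP_PGC3_noukb"), (2, "Depression_iPSYCH_2023"),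
       (3, "ADHD2022_iPSYCH_deCODE"), (4, "ASD_PGC"), (5, "PGC_AN2")] := by
  simp [pvKeys, PySem.List.enumerate]

theorem mem_pvEntries_rank {x : String} {t : Int × String}
    (h : t ∈ pvEntries x) : t.1 ∈ pvRanks := by
  simp only [pvEntries, enumerate_pvKeys, List.mem_flatMap] at h
  obtain ⟨a, ha, hf⟩ := h
  fin_cases ha <;>
    · split at hf
      · simp at hf; simp [hf, pvRanks]
      · simp at hf

-- filtering the tagged list by one concrete rank recovers A's filter pass
theorem pvGroup_flatMap (l : List String) (r : Int) (k : String)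
    (hx : ∀ x, pvGroup (pvEntries x) r =
      if PySem.Str.isIn k x then [(r, x)] else []) :
    (pvGroup (l.flatMap pvEntries) r).map (fun t => t.2)
      = l.filter (fun x => PySem.Str.isIn k x) := by
  induction l with
  | nil => rfl
  | cons a l ih =>
    simp only [List.flatMap_cons, List.filter_cons]
    have : pvGroup (pvEntries a ++ l.flatMap pvEntries) r
        = pvGroup (pvEntries a) r ++ pvGroup (l.flatMap pvEntries) r := by
      simp [pvGroup, List.filter_append]
    rw [this, List.map_append, hx a, ih]
    by_cases h : PySem.Chars.isIn k.toList a.toList <;> simp [PySem.Str.isIn, h]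


theorem pvEntriesGroup0 (x : String) :
    pvGroup (pvEntries x) 0 = if PySem.Str.isIn "PGC3_SCZ" x then [((0 : Int), x)] else [] := by
  simp only [pvGroup, pvEntries, enumerate_pvKeys, List.flatMap_cons, List.flatMap_nil,
    List.filter_append, apply_ite (List.filter (fun t : Int × String => t.1 == (0 : Int)))]
  simp

theorem pvEntriesGroup1 (x : String) :
    pvGroup (pvEntries x) 1 = if PySem.Str.isIn "BIP_PGC3_noukb" x then [((1 : Int), x)] else [] := by
  simp only [pvGroup, pvEntries, enumerate_pvKeys, List.flatMap_cons, List.flatMap_nil,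
    List.filter_append, apply_ite (List.filter (fun t : Int × String => t.1 == (1 : Int)))]
  simp

theorem pvEntriesGroup2 (x : String) :
    pvGroup (pvEntries x) 2 = if PySem.Str.isIn "Depression_iPSYCH_2023" x then [((2 : Int), x)] else [] := by
  simp only [pvGroup, pvEntries, enumerate_pvKeys, List.flatMap_cons, List.flatMap_nil,
    List.filter_append, apply_ite (List.filter (fun t : Int × String => t.1 == (2 : Int)))]
  simp

theorem pvEntriesGroup3 (x : String) :
    pvGroup (pvEntries x) 3 = if PySem.Str.isIn "ADHD2022_iPSYCH_deCODE" x then [((3 : Int), x)] else [] := by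
  simp only [pvGroup, pvEntries, enumerate_pvKeys, List.flatMap_cons, List.flatMap_nil,
    List.filter_append, apply_ite (List.filter (fun t : Int × String => t.1 == (3 : Int)))]
  simp

theorem pvEntriesGroup4 (x : String) :
    pvGroup (pvEntries x) 4 = if PySem.Str.isIn "ASD_PGC" x then [((4 : Int), x)] else [] := by
  simp only [pvGroup, pvEntries, enumerate_pvKeys, List.flatMap_cons, List.flatMap_nil,
    List.filter_append, apply_ite (List.filter (fun t : Int × String => t.1 == (4 : Int)))]
  simp

theorem pvEntriesGroup5 (x : String) :
    pvGroup (pvEntries x) 5 = if PySem.Str.isIn "PGC_AN2" x then [((5 : Int), x)] else [] := by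
  simp only [pvGroup, pvEntries, enumerate_pvKeys, List.flatMap_cons, List.flatMap_nil,
    List.filter_append, apply_ite (List.filter (fun t : Int × String => t.1 == (5 : Int)))]
  simp

-- ===== VERDICT =====
theorem order_function_spec : Claim_equal_order_function := by
  intro l _
  show order_function l = order_function_alt l
  have hsort := PySem.List.sorted_eq_foldl_insertBy (l.flatMap pvEntries)
    (fun t : Int × String => t.1)
  have hranks : ∀ t ∈ l.flatMap pvEntries, t.1 ∈ pvRanks := by
    intro t ht
    simp only [List.mem_flatMap] at ht
    obtain ⟨x, _, hx⟩ := ht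
    exact mem_pvEntries_rank hx
  have hg := foldl_insert_grouped (l.flatMap pvEntries) hranks
  have e0 : (pvGroup (l.flatMap pvEntries) 0).map (fun t => t.2)
      = l.filter (fun x => PySem.Str.isIn "PGC3_SCZ" x) :=
    pvGroup_flatMap l 0 _ pvEntriesGroup0
  have e1 : (pvGroup (l.flatMap pvEntries) 1).map (fun t => t.2)
      = l.filter (fun x => PySem.Str.isIn "BIP_PGC3_noukb" x) :=
    pvGroup_flatMap l 1 _ pvEntriesGroup1
  have e2 : (pvGroup (l.flatMap pvEntries) 2).map (fun t => t.2)
      = l.filter (fun x => PySem.Str.isIn "Depression_iPSYCH_2023" x) :=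
    pvGroup_flatMap l 2 _ pvEntriesGroup2
  have e3 : (pvGroup (l.flatMap pvEntries) 3).map (fun t => t.2)
      = l.filter (fun x => PySem.Str.isIn "ADHD2022_iPSYCH_deCODE" x) :=
    pvGroup_flatMap l 3 _ pvEntriesGroup3
  have e4 : (pvGroup (l.flatMap pvEntries) 4).map (fun t => t.2)
      = l.filter (fun x => PySem.Str.isIn "ASD_PGC" x) :=
    pvGroup_flatMap l 4 _ pvEntriesGroup4
  have e5 : (pvGroup (l.flatMap pvEntries) 5).map (fun t => t.2)
      = l.filter (fun x => PySem.Str.isIn "PGC_AN2" x) :=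
    pvGroup_flatMap l 5 _ pvEntriesGroup5
  simp only [order_function, order_function_alt, hsort, hg, pvGl, pvRanks,
    List.flatMap_cons, List.flatMap_nil, List.append_nil, List.map_append,
    e0, e1, e2, e3, e4, e5, List.append_assoc]
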